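-- pv_equiv track=rewrite | github.com/AioaneiElena/AI_YAHTZEE | ai_update/gamescheck.py | YAHTZEE
-- ===== SOURCE A (Python) =====
-- def YAHTZEE(dices):
--     counts = {}
--
--     for dice in dices[1]:
--         if dice in counts:
--             counts[dice] += 1
--         else:
--             counts[dice] = 1
--
--     for count in counts.values():
--         if count ==5:
--             return 50
--     return 0
-- ===== SOURCE B (Python) =====
-- def YAHTZEE(dices):
--     s = sorted(dices[1])
--     run = 1
--     for i in range(1, len(s)):
--         if s[i] == s[i - 1]:
--             run += 1
--         else:
--             if run == 5:
--                 return 50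
--             run = 1
--     if run == 5:
--         return 50
--     return 0
-- ===== Notes on version B (the rewrite author's own statement) =====
-- stated objective: alternative
-- what changed: Replaces the dict-based frequency count with sorting a copy of dices[1] and a single linear scan over adjacent-equal run lengths, returning 50 exactly when a maximal run has length 5.
import Mathlib
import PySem

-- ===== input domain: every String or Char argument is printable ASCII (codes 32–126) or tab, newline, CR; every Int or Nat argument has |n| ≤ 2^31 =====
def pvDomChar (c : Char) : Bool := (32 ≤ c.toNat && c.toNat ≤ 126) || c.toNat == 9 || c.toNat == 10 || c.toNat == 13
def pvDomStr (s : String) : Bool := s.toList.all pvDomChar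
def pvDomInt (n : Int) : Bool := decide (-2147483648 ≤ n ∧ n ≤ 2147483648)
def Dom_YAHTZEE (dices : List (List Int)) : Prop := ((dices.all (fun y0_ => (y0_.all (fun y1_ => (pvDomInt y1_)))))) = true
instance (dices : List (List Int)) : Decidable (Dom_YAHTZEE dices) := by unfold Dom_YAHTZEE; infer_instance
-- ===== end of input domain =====

-- B replaces A's dict frequency count by sorting dices[1] and scanning adjacent-equal run lengths; same return value, alternative algorithm.

-- ===== PORT A =====
def YAHTZEE (dices : List (List Int)) : Int :=
  let row := (PySem.List.pyGet? dices 1).getD []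
  let counts := row.foldl
    (fun (d : PySem.Dict Int Int) dice =>
      if d.contains dice then d.modify dice 0 (· + 1) else d.insert dice 1)
    PySem.Dict.empty
  if counts.values.any (fun c => c == 5) then 50 else 0

-- ===== PORT B =====
-- linear scan of the sorted list, tracking the current run length
def pvRunScan (prev run : Int) : List Int → Int
  | [] => if run == 5 then 50 else 0
  | x :: xs =>
      if x == prev then pvRunScan x (run + 1) xs
      else if run == 5 then 50 else pvRunScan x 1 xs

def YAHTZEE_alt (dices : List (List Int)) : Int :=
  let s := PySem.List.sorted ((PySem.List.pyGet? dices 1).getD []) (fun x => x) false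
  match s with
  | [] => 0
  | x :: xs => pvRunScan x 1 xs

-- ===== PRECONDITION & SPEC =====
-- Pre_ excludes inputs with fewer than two rows, on which A raises IndexError at dices[1].
def Pre_YAHTZEE (dices : List (List Int)) : Prop := 2 ≤ dices.length
instance (dices : List (List Int)) : Decidable (Pre_YAHTZEE dices) := by unfold Pre_YAHTZEE; infer_instance
def pvWitness_YAHTZEE : List (List Int) := [[1, 2], [3, 3, 3, 3, 3]]

def Spec_YAHTZEE (dices : List (List Int)) (out : Int) : Prop := out = YAHTZEE_alt dices
instance (dices : List (List Int)) (out : Int) : Decidable (Spec_YAHTZEE dices out) := by unfold Spec_YAHTZEE; infer_instance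

-- ===== CLAIM (what is proved, stated in full; the proofs are below) =====
def Claim_equal_YAHTZEE : Prop := ∀ (dices : List (List Int)), Dom_YAHTZEE dices → Pre_YAHTZEE dices → Spec_YAHTZEE dices (YAHTZEE dices)

-- ===== LEMMAS AND PROOFS =====

theorem pv_step_eq (d : PySem.Dict Int Int) (x : Int) :
    (if d.contains x then d.modify x 0 (· + 1) else d.insert x 1) = d.modify x 0 (· + 1) := by
  by_cases h : d.contains x
  · simp [h]
  · have hg : d.get? x = none := (PySem.Dict.get?_eq_none_iff_contains d x).2 (by simpa using h)
    simp [h, PySem.Dict.modify, PySem.Dict.getD, hg]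
theorem pv_A_char (row : List Int) :
    ((PySem.Dict.counter row).values.any (fun c => c == 5) = true) ↔ ∃ v ∈ row, row.count v = 5 := by
  rw [PySem.Dict.values_eq_map_keys _ (PySem.Dict.nodup_keys_counter row) 0]
  simp [List.any_map, PySem.Dict.getD_counter, PySem.Dict.keys_counter, PySem.Set.mem_ofList, List.any_eq_true]
  constructor
  · rintro ⟨v, hv, h⟩; exact ⟨v, hv, by exact_mod_cast h⟩
  · rintro ⟨v, hv, h⟩; exact ⟨v, hv, by exact_mod_cast h⟩
theorem pv_runScan_char (rest : List Int) : ∀ (prev run : Int),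
    rest.Pairwise (· ≤ ·) → (∀ y ∈ rest, prev ≤ y) →
    pvRunScan prev run rest
      = (if (run + rest.count prev = 5) ∨ (∃ v ∈ rest, prev < v ∧ rest.count v = 5) then 50 else 0) := by
  induction rest with
  | nil => intro prev run _ _; simp [pvRunScan]
  | cons x xs ih =>
    intro prev run hs hge
    have hs' : xs.Pairwise (· ≤ ·) := hs.tail
    have hx : ∀ y ∈ xs, x ≤ y := fun y hy => (List.pairwise_cons.1 hs).1 y hy
    by_cases hxp : x = prev
    · subst hxp
      rw [pvRunScan]
      simp only [BEq.rfl, if_true]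
      rw [ih x (run + 1) hs' hx]
      have hcnt : (x :: xs).count x = xs.count x + 1 := by simp
      congr 1
      apply propext
      constructor
      · rintro (h | ⟨v, hv, hlt, hc⟩)
        · left; omega
        · right
          have hne : ¬ x = v := by omega
          exact ⟨v, List.mem_cons_of_mem _ hv, hlt, by simpa [List.count_cons, hne] using hc⟩
      · rintro (h | ⟨v, hv, hlt, hc⟩)
        · left; omega
        · right
          have hne : ¬ x = v := by omega
          rcases List.mem_cons.1 hv with rfl | hv
          · omega
          · exact ⟨v, hv, hlt, by simpa [List.count_cons, hne] using hc⟩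
    · have hlt : prev < x := lt_of_le_of_ne (hge x (List.mem_cons_self)) (fun h => hxp h.symm)
      have hnp : prev ∉ x :: xs := by
        intro h
        rcases List.mem_cons.1 h with h | h
        · exact hxp h.symm
        · exact absurd (hx prev h) (not_le.2 hlt)
      have hc0 : (x :: xs).count prev = 0 := List.count_eq_zero.2 hnp
      rw [pvRunScan]
      have hbx : (x == prev) = false := by simp [hxp]
      rw [hbx]
      simp only [Bool.false_eq_true, if_false]
      by_cases hr5 : run = 5
      · simp [hr5, hc0]
      · have hbr : (run == 5) = false := by simp [hr5]
        rw [hbr]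
        simp only [Bool.false_eq_true, if_false]
        rw [ih x 1 hs' hx]
        congr 1
        apply propext
        have hcx : (x :: xs).count x = xs.count x + 1 := by simp
        constructor
        · rintro (h | ⟨v, hv, hvlt, hc⟩)
          · right; exact ⟨x, List.mem_cons_self, hlt, by omega⟩
          · right
            have hvx : ¬ x = v := by omega
            exact ⟨v, List.mem_cons_of_mem _ hv, lt_trans hlt hvlt,
              by simpa [List.count_cons, hvx] using hc⟩
        · rintro (h | ⟨v, hv, hvlt, hc⟩)
          · omega
          · by_cases hvx : v = x
            · subst hvx; left; omega
            · have hvx' : ¬ x = v := fun h => hvx h.symm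
              have hvm : v ∈ xs := by
                rcases List.mem_cons.1 hv with h | h
                · exact absurd h hvx
                · exact h
              have hxv : x < v := lt_of_le_of_ne (hx v hvm) (fun h => hvx h.symm)
              right; exact ⟨v, hvm, hxv, by simpa [List.count_cons, hvx'] using hc⟩
theorem pv_B_char (s : List Int) (hs : s.Pairwise (· ≤ ·)) :
    (match s with | [] => (0 : Int) | x :: xs => pvRunScan x 1 xs)
      = (if ∃ v ∈ s, s.count v = 5 then 50 else 0) := by
  match s with
  | [] => simp
  | x :: xs =>
    have hx : ∀ y ∈ xs, x ≤ y := fun y hy => (List.pairwise_cons.1 hs).1 y hy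
    show pvRunScan x 1 xs = _
    rw [pv_runScan_char xs x 1 hs.tail hx]
    congr 1
    apply propext
    constructor
    · rintro (h | ⟨v, hv, hvlt, hc⟩)
      · exact ⟨x, List.mem_cons_self, by simp; omega⟩
      · have hvx : ¬ x = v := by omega
        exact ⟨v, List.mem_cons_of_mem _ hv, by simpa [List.count_cons, hvx] using hc⟩
    · rintro ⟨v, hv, hc⟩
      by_cases hvx : v = x
      · subst hvx
        left
        have : (v :: xs).count v = xs.count v + 1 := by simp
        omega
      · have hvx' : ¬ x = v := fun h => hvx h.symm
        have hvm : v ∈ xs := by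
          rcases List.mem_cons.1 hv with h | h
          · exact absurd h hvx
          · exact h
        have hxv : x < v := lt_of_le_of_ne (hx v hvm) (fun h => hvx h.symm)
        right
        exact ⟨v, hvm, hxv, by simpa [List.count_cons, hvx'] using hc⟩


-- ===== VERDICT (by name: the statement is the Claim_ definition above) =====
theorem YAHTZEE_spec : Claim_equal_YAHTZEE := by
  intro dices _ _
  unfold Spec_YAHTZEE YAHTZEE YAHTZEE_alt
  set row := (PySem.List.pyGet? dices 1).getD [] with hrow
  have hA : row.foldl
      (fun (d : PySem.Dict Int Int) dice =>
        if d.contains dice then d.modify dice 0 (· + 1) else d.insert dice 1)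
      PySem.Dict.empty = PySem.Dict.counter row := by
    rw [PySem.Dict.counter_eq_foldl]
    exact List.foldl_ext _ _ _ (fun d x _ => pv_step_eq d x)
  have hp : (PySem.List.sorted row (fun x => x) false).Perm row :=
    PySem.List.sorted_perm row (fun x => x) false
  have hs : (PySem.List.sorted row (fun x => x) false).Pairwise (· ≤ ·) := by
    simpa using PySem.List.sorted_pairwise row (fun x => x)
  simp only [hA]
  rw [pv_B_char _ hs]
  have hiff : ((PySem.Dict.counter row).values.any (fun c => c == 5) = true)
      ↔ ∃ v ∈ PySem.List.sorted row (fun x => x) false,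
          (PySem.List.sorted row (fun x => x) false).count v = 5 := by
    rw [pv_A_char row]
    constructor <;> rintro ⟨v, hv, hc⟩
    · exact ⟨v, hp.mem_iff.2 hv, by rw [hp.count_eq]; exact hc⟩
    · exact ⟨v, hp.mem_iff.1 hv, by rw [← hp.count_eq v]; exact hc⟩
  by_cases h : (PySem.Dict.counter row).values.any (fun c => c == 5) = true
  · rcases hiff.1 h with ⟨v, hv, hc⟩
    simp only [h, if_true]
    rw [if_pos ⟨v, hv, hc⟩]
  · simp only [h, if_false, Bool.false_eq_true]
    rw [if_neg]
    rintro ⟨v, hv, hc⟩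
    exact h (hiff.2 ⟨v, hv, hc⟩)
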